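-- pv_equiv track=rewrite | github.com/NEKOparapa/AiNiee | ModuleFolders/FileReader/TransReader.py | check_list_conditions
-- ===== SOURCE A (Python) =====
-- def check_list_conditions(contexts: list[str],start_str: str = None,end_str: str = None,middle_list: list[str] = None) -> bool:
--
--     # 检查空列表
--     if not contexts:
--         return False
--
--     # 1. 检查 str_a (开头字符串)
--     if start_str is not None:
--         # 检查 list_a 中的每个元素
--         for item_in_a in contexts:
--             if not item_in_a.startswith(start_str):
--                 return False
--
--     # 2. 检查 str_b (结尾字符串)
--     if end_str is not None:
--         for item_in_a in contexts:
--             if not item_in_a.endswith(end_str):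
--                 return False
--
--     # 3. 检查 list_b (包含所有子字符串)
--     if middle_list is not None and middle_list:
--         for item_in_a in contexts:
--             # 对于 list_a 中的每一个元素，检查它是否包含 list_b 中的所有子字符串
--             for sub_item_in_b in middle_list:
--                 if sub_item_in_b not in item_in_a:
--                     return False # item_in_a 没有包含 list_b 中的某个元素
--
--     # 如果所有检查都通过了
--     return True
-- ===== SOURCE B (Python) =====
-- def check_list_conditions(contexts: list[str], start_str: str = None, end_str: str = None, middle_list: list[str] = None) -> bool:
--     # Build a table of unary predicates, one per required condition, then
--     # require every predicate to hold on every context element.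
--     checks = []
--     if start_str is not None:
--         checks.append(lambda it: it.startswith(start_str))
--     if end_str is not None:
--         checks.append(lambda it: it.endswith(end_str))
--     for sub in (middle_list or []):
--         checks.append(lambda it, sub=sub: sub in it)
--     return bool(contexts) and all(chk(it) for it in contexts for chk in checks)
-- ===== Notes on version B (the rewrite author's own statement) =====
-- stated objective: alternative
-- what changed: B reifies the conditions into a list of unary predicates built once (one per active option, one per middle substring) and decides the result as a single universal quantification over contexts x predicates, instead of A's three staged early-return passes with a nested middle loop.
import Mathlib
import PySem

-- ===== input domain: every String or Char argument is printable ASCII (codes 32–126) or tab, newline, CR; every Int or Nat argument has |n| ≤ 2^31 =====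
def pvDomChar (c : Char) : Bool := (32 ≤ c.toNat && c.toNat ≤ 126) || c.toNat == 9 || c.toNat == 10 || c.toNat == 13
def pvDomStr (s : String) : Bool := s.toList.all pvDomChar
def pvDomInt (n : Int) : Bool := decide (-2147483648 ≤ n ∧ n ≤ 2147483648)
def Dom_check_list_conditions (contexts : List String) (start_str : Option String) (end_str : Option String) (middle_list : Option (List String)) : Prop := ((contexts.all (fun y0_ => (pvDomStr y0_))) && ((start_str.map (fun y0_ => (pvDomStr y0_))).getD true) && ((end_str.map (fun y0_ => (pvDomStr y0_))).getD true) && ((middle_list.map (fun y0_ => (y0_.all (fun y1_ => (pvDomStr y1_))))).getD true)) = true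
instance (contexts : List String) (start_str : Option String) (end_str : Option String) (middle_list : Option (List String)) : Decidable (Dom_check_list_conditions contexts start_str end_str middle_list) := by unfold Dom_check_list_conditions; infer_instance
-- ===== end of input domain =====

-- B reifies the conditions into a predicate table built once and decides the result as one
-- universal quantification over contexts x predicates (objective: alternative); equal on all inputs.


-- ===== PORT A =====
-- Port of A: empty-list guard, then three sequential early-return passes over
-- contexts (each Python 'for' with 'return False' is the corresponding List.all).
def check_list_conditions (contexts : List String) (start_str : Option String) (end_str : Option String) (middle_list : Option (List String)) : Bool :=
  if contexts.isEmpty then false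
  else
    -- 1. start_str pass
    if (match start_str with
        | none => true
        | some s => contexts.all (fun item => PySem.Str.startswith item s)) = false then false
    else
    -- 2. end_str pass
    if (match end_str with
        | none => true
        | some e => contexts.all (fun item => PySem.Str.endswith item e)) = false then false
    else
    -- 3. middle_list pass (guarded by 'is not None and middle_list')
    if (match middle_list with
        | none => true
        | some ml =>
          if ml.isEmpty then true
          else contexts.all (fun item => ml.all (fun sub => PySem.Str.isIn sub item))) = false then false
    else true

-- ===== PORT B =====
-- Port of B: build the predicate table once (option conditions, then one predicate
-- per middle substring), then one universal quantification over contexts x predicates.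
def check_list_conditions_alt (contexts : List String) (start_str : Option String) (end_str : Option String) (middle_list : Option (List String)) : Bool :=
  let checks : List (String → Bool) :=
    (match start_str with | none => [] | some s => [fun it => PySem.Str.startswith it s]) ++
    (match end_str with | none => [] | some e => [fun it => PySem.Str.endswith it e]) ++
    (middle_list.getD []).map (fun sub => fun it => PySem.Str.isIn sub it)
  !contexts.isEmpty && contexts.all (fun it => checks.all (fun c => c it))

-- ===== PRECONDITION & SPEC =====
def Spec_check_list_conditions (contexts : List String) (start_str : Option String) (end_str : Option String) (middle_list : Option (List String)) (out : Bool) : Prop := out = check_list_conditions_alt contexts start_str end_str middle_list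
instance (contexts : List String) (start_str : Option String) (end_str : Option String) (middle_list : Option (List String)) (out : Bool) : Decidable (Spec_check_list_conditions contexts start_str end_str middle_list out) := by unfold Spec_check_list_conditions; infer_instance

-- ===== CLAIM =====
def Claim_equal_check_list_conditions : Prop := ∀ (contexts : List String) (start_str : Option String) (end_str : Option String) (middle_list : Option (List String)), Dom_check_list_conditions contexts start_str end_str middle_list → Spec_check_list_conditions contexts start_str end_str middle_list (check_list_conditions contexts start_str end_str middle_list)

-- ===== LEMMAS AND PROOFS =====

-- (xs.all p && xs.all q) = xs.all (p && q): the per-item conjunction equals the two passes.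
theorem all_and_all {α : Type} (xs : List α) (p q : α → Bool) :
    (xs.all p && xs.all q) = xs.all (fun x => p x && q x) := by
  induction xs with
  | nil => rfl
  | cons a t ih =>
    simp only [List.all_cons, ← ih]
    cases p a <;> cases q a <;> cases t.all p <;> cases t.all q <;> rfl

-- Splitting the predicate table: checking cs ++ ds per item equals the product of the two checks.
theorem all_checks_append {α : Type} (xs : List α) (cs ds : List (α → Bool)) :
    xs.all (fun x => (cs ++ ds).all (fun c => c x))
      = (xs.all (fun x => cs.all (fun c => c x)) && xs.all (fun x => ds.all (fun c => c x))) := by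
  rw [all_and_all]
  simp [List.all_append]

-- A mapped predicate table is the nested loop.
theorem all_checks_map {α β : Type} (xs : List α) (ml : List β) (f : β → α → Bool) :
    xs.all (fun x => (ml.map f).all (fun c => c x)) = xs.all (fun x => ml.all (fun b => f b x)) := by
  simp only [List.all_map]
  rfl

-- The constant-true pass is true.
theorem all_const_true {α : Type} (xs : List α) : xs.all (fun _ => true) = true := by
  induction xs with
  | nil => rfl
  | cons a t ih => simpa using ih

-- A's chain of early-return guards is the conjunction of the pass results.
theorem if_chain (a b c : Bool) :
    (if a = false then false else if b = false then false else if c = false then false else true)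
      = (a && (b && c)) := by
  cases a <;> cases b <;> cases c <;> rfl

-- ===== VERDICT =====
theorem check_list_conditions_spec : Claim_equal_check_list_conditions := by
  intro contexts start_str end_str middle_list hdom
  clear hdom
  unfold Spec_check_list_conditions check_list_conditions check_list_conditions_alt
  cases h : contexts.isEmpty with
  | true => simp [h]
  | false =>
    simp only [h, Bool.false_eq_true, if_false, Bool.not_false, Bool.true_and]
    rw [if_chain, all_checks_append, all_checks_append, all_checks_map]
    rcases start_str with _ | s <;> rcases end_str with _ | e <;>
      rcases middle_list with _ | ml
    case none.none.none | none.some.none | some.none.none | some.some.none =>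
      simp [Bool.and_assoc, all_const_true]
    all_goals
      cases ml with
      | nil => simp [Bool.and_assoc, all_const_true]
      | cons m ms => simp [List.isEmpty_cons, Bool.and_assoc, all_const_true]
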